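-- pv_equiv track=rewrite | github.com/Abhiram-Bhat/Majorproject | workout_data.py | _prioritize_circuit_exercises
-- ===== SOURCE A (Python) =====
-- from typing import Dict, List, Any
--
-- def _prioritize_circuit_exercises(exercises: List[str], count: int) -> List[str]:
--     """Select exercises suitable for circuit training"""
--     # Prefer bodyweight and dynamic exercises for circuits
--     circuit_friendly = ['Push-ups', 'Pull-ups', 'Squats', 'Burpees', 'Mountain Climbers',
--                        'Jump Squats', 'High Knees', 'Plank', 'Jumping Jacks']
--
--     # Filter available exercises that are circuit-friendly
--     preferred = [ex for ex in exercises if any(friendly in ex for friendly in circuit_friendly)]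
--     others = [ex for ex in exercises if ex not in preferred]
--
--     # Select from preferred first, then others
--     selected = preferred[:count]
--     if len(selected) < count:
--         remaining = count - len(selected)
--         selected.extend(others[:remaining])
--
--     return selected[:count]
-- ===== SOURCE B (Python) =====
-- def _prioritize_circuit_exercises(exercises, count):
--     """Select exercises suitable for circuit training"""
--     circuit_friendly = ['Push-ups', 'Pull-ups', 'Squats', 'Burpees', 'Mountain Climbers',
--                         'Jump Squats', 'High Knees', 'Plank', 'Jumping Jacks']
--
--     def key(ex):
--         return 0 if any(friendly in ex for friendly in circuit_friendly) else 1
--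
--     # Stable sort puts circuit-friendly exercises first, each group in original order.
--     return sorted(exercises, key=key)[:count]
-- ===== Notes on version B (the rewrite author's own statement) =====
-- stated objective: simpler
-- what changed: Replaced the two filter passes plus conditional extend and double truncation with one stable sort on a 0/1 friendliness key followed by a single slice; Pre_ restricts to count >= 0, the natural domain (for negative count A's double slice drops tail elements twice).
-- outside the precondition, e.g. on _prioritize_circuit_exercises(['Squats', 'Push-ups'], -1): A returns [], B returns ['Squats']
import Mathlib
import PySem

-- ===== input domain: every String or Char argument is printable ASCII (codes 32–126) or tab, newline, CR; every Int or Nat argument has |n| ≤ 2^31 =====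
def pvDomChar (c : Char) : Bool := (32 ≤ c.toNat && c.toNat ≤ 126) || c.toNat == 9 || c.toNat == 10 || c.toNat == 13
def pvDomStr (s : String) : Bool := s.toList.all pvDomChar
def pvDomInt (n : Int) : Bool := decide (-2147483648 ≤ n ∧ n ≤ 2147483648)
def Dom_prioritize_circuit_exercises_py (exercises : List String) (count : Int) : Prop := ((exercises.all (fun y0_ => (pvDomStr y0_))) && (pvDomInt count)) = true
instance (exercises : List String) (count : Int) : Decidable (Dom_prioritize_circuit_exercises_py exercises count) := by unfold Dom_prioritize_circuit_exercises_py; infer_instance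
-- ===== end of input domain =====

-- B replaces A's two filter passes + conditional extend + double truncation by one stable
-- sort on a 0/1 friendliness key followed by a single slice (objective: simpler).


-- The circuit_friendly constant shared by both Pythons
def pvCircuitFriendly : List String :=
  ["Push-ups", "Pull-ups", "Squats", "Burpees", "Mountain Climbers",
   "Jump Squats", "High Knees", "Plank", "Jumping Jacks"]

-- any(friendly in ex for friendly in circuit_friendly)
def pvFriendly (ex : String) : Bool :=
  pvCircuitFriendly.any (fun friendly => PySem.Str.isIn friendly ex)

-- ===== PORT A =====
def prioritize_circuit_exercises_py (exercises : List String) (count : Int) : List String :=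
  let preferred := exercises.filter (fun ex => pvFriendly ex)
  let others := exercises.filter (fun ex => !(preferred.contains ex))
  let selected := PySem.List.slice preferred none (some count)
  let selected :=
    if (selected.length : Int) < count then
      selected ++ PySem.List.slice others none (some (count - (selected.length : Int)))
    else selected
  PySem.List.slice selected none (some count)

-- ===== PORT B =====
def prioritize_circuit_exercises_py_alt (exercises : List String) (count : Int) : List String :=
  let key := fun (ex : String) => if pvFriendly ex then (0 : Int) else 1
  PySem.List.slice (PySem.List.sorted exercises key false) none (some count)

-- ===== PRECONDITION & SPEC =====
-- Pre_ restricts to count ≥ 0, the task's natural domain ("select count exercises"); for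
-- negative count A still returns, but its value is an artefact of slicing twice ([:count]
-- applied to preferred and again to the result drops tail elements twice), so that corner
-- is excluded rather than matched.
def Pre_prioritize_circuit_exercises_py (exercises : List String) (count : Int) : Prop :=
  0 ≤ count
instance (exercises : List String) (count : Int) : Decidable (Pre_prioritize_circuit_exercises_py exercises count) := by unfold Pre_prioritize_circuit_exercises_py; infer_instance

def pvWitness_prioritize_circuit_exercises_py : List String × Int :=
  (["Squats", "Bench Press", "Push-ups"], 2)

def Spec_prioritize_circuit_exercises_py (exercises : List String) (count : Int) (out : List String) : Prop := out = prioritize_circuit_exercises_py_alt exercises count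
instance (exercises : List String) (count : Int) (out : List String) : Decidable (Spec_prioritize_circuit_exercises_py exercises count out) := by unfold Spec_prioritize_circuit_exercises_py; infer_instance

-- ===== CLAIM (what is proved, stated in full; the proofs are below) =====
def Claim_equal_prioritize_circuit_exercises_py : Prop := ∀ (exercises : List String) (count : Int), Dom_prioritize_circuit_exercises_py exercises count → Pre_prioritize_circuit_exercises_py exercises count → Spec_prioritize_circuit_exercises_py exercises count (prioritize_circuit_exercises_py exercises count)

-- ===== LEMMAS AND PROOFS =====

lemma insertBy_cons {α : Type} (before : α → α → Bool) (x y : α) (ys : List α) :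
    PySem.List.insertBy before x (y :: ys)
      = if before x y then x :: y :: ys else y :: PySem.List.insertBy before x ys := rfl

-- insertBy with a predicate true on every element of the list puts x in front
lemma insertBy_of_forall_before {α : Type} (before : α → α → Bool) (x : α) (ys : List α)
    (h : ∀ y ∈ ys, before x y = true) :
    PySem.List.insertBy before x ys = x :: ys := by
  cases ys with
  | nil => rfl
  | cons y ys => rw [insertBy_cons, if_pos (h y (by simp))]

-- insertBy skips a prefix on which the predicate is false
lemma insertBy_append_left {α : Type} (before : α → α → Bool) (x : α) (A B : List α)
    (hA : ∀ a ∈ A, before x a = false) :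
    PySem.List.insertBy before x (A ++ B) = A ++ PySem.List.insertBy before x B := by
  induction A with
  | nil => rfl
  | cons a A ih =>
      have hxa : before x a = false := hA a (by simp)
      simp only [List.cons_append]
      rw [insertBy_cons, if_neg (by simp [hxa]), ih (fun a ha => hA a (by simp [ha]))]

-- the stable insertion sort on a 0/1 key is exactly the two-bucket partition
lemma sorted_two_bucket_aux (p : String → Bool) (xs A B : List String)
    (hA : ∀ a ∈ A, p a = true) (hB : ∀ b ∈ B, p b = false) :
    xs.foldl (fun acc x =>
        PySem.List.insertBy
          (fun a b => decide ((if p a then (0 : Int) else 1) < (if p b then (0 : Int) else 1)))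
          x acc) (A ++ B)
      = (A ++ xs.filter p) ++ (B ++ xs.filter (fun x => !(p x))) := by
  induction xs generalizing A B with
  | nil => simp
  | cons x xs ih =>
      by_cases hx : p x = true
      · have step : PySem.List.insertBy
            (fun a b => decide ((if p a then (0 : Int) else 1) < (if p b then (0 : Int) else 1)))
            x (A ++ B) = (A ++ [x]) ++ B := by
          rw [insertBy_append_left _ _ _ _ (fun a ha => by simp [hx, hA a ha]),
              insertBy_of_forall_before _ _ _ (fun b hb => by simp [hx, hB b hb])]
          simp
        have hA' : ∀ a ∈ A ++ [x], p a = true := by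
          intro a ha
          rcases List.mem_append.1 ha with h | h
          · exact hA a h
          · rw [List.mem_singleton.1 h]; exact hx
        simp only [List.foldl_cons, step, ih (A ++ [x]) B hA' hB]
        simp [hx, List.append_assoc]
      · have hx' : p x = false := by simpa using hx
        have step : PySem.List.insertBy
            (fun a b => decide ((if p a then (0 : Int) else 1) < (if p b then (0 : Int) else 1)))
            x (A ++ B) = A ++ (B ++ [x]) := by
          rw [PySem.List.insertBy_of_forall_not_before _ _ (A ++ B) (by
                intro a ha
                rcases List.mem_append.1 ha with h | h
                · simp [hx', hA a h]
                · simp [hx', hB a h])]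
          simp
        have hB' : ∀ b ∈ B ++ [x], p b = false := by
          intro b hb
          rcases List.mem_append.1 hb with h | h
          · exact hB b h
          · rw [List.mem_singleton.1 h]; exact hx'
        simp only [List.foldl_cons, step, ih A (B ++ [x]) hA hB']
        simp [hx', List.append_assoc]

lemma sorted_two_bucket (p : String → Bool) (xs : List String) :
    PySem.List.sorted xs (fun ex => if p ex then (0 : Int) else 1) false
      = xs.filter p ++ xs.filter (fun x => !(p x)) := by
  have := sorted_two_bucket_aux p xs [] [] (by simp) (by simp)
  simpa [PySem.List.sorted] using this

-- A's "others" filter is just the negation of the friendliness test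
lemma others_eq (exercises : List String) :
    exercises.filter
        (fun ex => !((exercises.filter (fun ex => pvFriendly ex)).contains ex))
      = exercises.filter (fun ex => !(pvFriendly ex)) := by
  apply List.filter_congr
  intro ex hex
  by_cases h : pvFriendly ex = true
  · simp [List.contains_eq_mem, List.mem_filter, hex, h]
  · have h' : pvFriendly ex = false := by simpa using h
    simp [List.contains_eq_mem, List.mem_filter, h']

-- ===== VERDICT (by name: the statement is the Claim_ definition above) =====
theorem prioritize_circuit_exercises_py_spec : Claim_equal_prioritize_circuit_exercises_py := by
  intro exercises count _ hpre
  unfold Spec_prioritize_circuit_exercises_py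
  unfold prioritize_circuit_exercises_py prioritize_circuit_exercises_py_alt
  simp only [others_eq, sorted_two_bucket pvFriendly exercises]
  set pref := exercises.filter (fun ex => pvFriendly ex) with hpref
  set oth := exercises.filter (fun ex => !(pvFriendly ex)) with hoth
  have h0 : (0:Int) ≤ count := hpre
  rw [PySem.List.slice_to pref h0, PySem.List.slice_to (pref ++ oth) h0]
  have hlen : (pref.take count.toNat).length = min count.toNat pref.length := List.length_take
  by_cases hlt : ((pref.take count.toNat).length : Int) < count
  · have hlen' : pref.length < count.toNat := by omega
    have htp : pref.take count.toNat = pref := List.take_of_length_le (by omega)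
    simp only [htp]
    rw [if_pos (show (pref.length : Int) < count by omega)]
    rw [PySem.List.slice_to oth (by omega)]
    have hcast : (count - (pref.length : Int)).toNat = count.toNat - pref.length := by omega
    rw [hcast, List.take_append, List.take_of_length_le (le_of_lt hlen')]
    -- final slice is a no-op: the list has length ≤ count
    rw [PySem.List.slice_to _ h0,
        List.take_of_length_le (by rw [List.length_append, List.length_take]; omega)]
  · simp only [if_neg hlt]
    rw [PySem.List.slice_to _ h0]
    have hle : count.toNat ≤ pref.length := by omega
    rw [List.take_take, min_self, List.take_append_of_le_length hle]
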